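-- pv_equiv track=rewrite | github.com/agumabanks/sai | core/channels/whatsapp/adapter.py | _detect_media_type
-- ===== SOURCE A (Python) =====
-- def _detect_media_type(url: str) -> str:
--     """Guess Baileys media type from URL extension."""
--     url_lower = url.lower()
--     if any(url_lower.endswith(ext) for ext in (".jpg", ".jpeg", ".png", ".gif", ".webp")):
--         return "image"
--     if any(url_lower.endswith(ext) for ext in (".mp4", ".avi", ".mov")):
--         return "video"
--     if any(url_lower.endswith(ext) for ext in (".mp3", ".ogg", ".wav", ".opus")):
--         return "audio"
--     return "document"
-- ===== SOURCE B (Python) =====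
-- _MEDIA_TYPES = {
--     "jpg": "image", "jpeg": "image", "png": "image", "gif": "image", "webp": "image",
--     "mp4": "video", "avi": "video", "mov": "video",
--     "mp3": "audio", "ogg": "audio", "wav": "audio", "opus": "audio",
-- }
--
--
-- def _detect_media_type(url: str) -> str:
--     """Guess Baileys media type from URL extension."""
--     url_lower = url.lower()
--     ext = url_lower.rsplit(".", 1)[1] if "." in url_lower else ""
--     return _MEDIA_TYPES.get(ext, "document")
-- ===== Notes on version B (the rewrite author's own statement) =====
-- stated objective: idiomatic
-- what changed: Replaces the three endswith-scans over tuples of dotted suffixes by extracting the part after the last dot once (rsplit) and looking it up in a single extension-to-media-type dict.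
import Mathlib
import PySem

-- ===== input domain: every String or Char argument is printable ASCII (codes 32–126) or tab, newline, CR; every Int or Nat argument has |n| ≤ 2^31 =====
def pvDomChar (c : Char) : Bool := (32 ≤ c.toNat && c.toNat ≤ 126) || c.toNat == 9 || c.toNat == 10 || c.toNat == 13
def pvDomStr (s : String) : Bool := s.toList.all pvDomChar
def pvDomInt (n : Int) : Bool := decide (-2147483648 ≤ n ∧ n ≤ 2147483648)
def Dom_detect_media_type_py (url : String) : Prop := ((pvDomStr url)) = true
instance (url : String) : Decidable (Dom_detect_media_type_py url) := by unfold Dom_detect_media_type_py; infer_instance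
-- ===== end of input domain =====

-- B replaces A's three endswith-scans by one extraction of the part after the last dot plus a single dict lookup (idiomatic).

-- ===== PORT A =====
def detect_media_type_py (url : String) : String :=
  let url_lower := PySem.Str.lower url
  if ([".jpg", ".jpeg", ".png", ".gif", ".webp"].any fun ext => PySem.Str.endswith url_lower ext) then "image"
  else if ([".mp4", ".avi", ".mov"].any fun ext => PySem.Str.endswith url_lower ext) then "video"
  else if ([".mp3", ".ogg", ".wav", ".opus"].any fun ext => PySem.Str.endswith url_lower ext) then "audio"
  else "document"

-- ===== PORT B =====
def pvMediaTypes : PySem.Dict (List Char) String :=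
  PySem.Dict.ofList
    [("jpg".toList, "image"), ("jpeg".toList, "image"), ("png".toList, "image"),
     ("gif".toList, "image"), ("webp".toList, "image"),
     ("mp4".toList, "video"), ("avi".toList, "video"), ("mov".toList, "video"),
     ("mp3".toList, "audio"), ("ogg".toList, "audio"), ("wav".toList, "audio"),
     ("opus".toList, "audio")]

def detect_media_type_py_alt (url : String) : String :=
  let l := (PySem.Str.lower url).toList
  -- url_lower.rsplit(".", 1)[1] ported by hand on the Chars side: the chars after the LAST '.'
  -- (exact here: the separator is the single char '.', so maxsplit=1 keeps everything after the last occurrence)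
  let ext : List Char :=
    if PySem.Chars.isIn ['.'] l then (l.reverse.takeWhile (fun c => c != '.')).reverse else []
  pvMediaTypes.getD ext "document"

-- ===== PRECONDITION & SPEC =====
def Spec_detect_media_type_py (url : String) (out : String) : Prop := out = detect_media_type_py_alt url
instance (url : String) (out : String) : Decidable (Spec_detect_media_type_py url out) := by unfold Spec_detect_media_type_py; infer_instance

-- ===== CLAIM (what is proved, stated in full; the proofs are below) =====
def Claim_equal_detect_media_type_py : Prop := ∀ (url : String), Dom_detect_media_type_py url → Spec_detect_media_type_py url (detect_media_type_py url)

-- ===== LEMMAS AND PROOFS =====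

-- e followed by a dot is a prefix of r iff r's first '.'-free segment is exactly e and r has a dot
theorem pv_prefix_dot (e r : List Char) (he : '.' ∉ e) :
    e ++ ['.'] <+: r ↔ ('.' ∈ r ∧ r.takeWhile (fun c => c != '.') = e) := by
  induction r generalizing e with
  | nil => simp
  | cons c r ih =>
    cases e with
    | nil =>
      by_cases hc : c = '.'
      · subst hc; simp
      · simp [List.cons_prefix_iff, hc, Ne.symm hc]
    | cons a e' =>
      have ha : a ≠ '.' := fun h => he (h ▸ List.mem_cons_self)
      have he' : '.' ∉ e' := fun h => he (List.mem_cons_of_mem _ h)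
      by_cases hc : c = a
      · subst hc
        simp [List.cons_prefix_iff, ha, Ne.symm ha, ih e' he']
      · by_cases hcd : c = '.'
        · subst hcd
          simp [List.cons_prefix_iff, Ne.symm ha]
        · simp [List.cons_prefix_iff, hc, hcd]

-- url_lower ends with '.'-e iff it contains a dot and the reverse's '.'-free head is e.reverse
theorem pv_endswith_dot (lw e : List Char) (he : '.' ∉ e) :
    PySem.Chars.endswith lw ('.' :: e) = true ↔
      ('.' ∈ lw ∧ lw.reverse.takeWhile (fun c => c != '.') = e.reverse) := by
  rw [PySem.Chars.endswith_iff, ← List.reverse_prefix, List.reverse_cons,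
    pv_prefix_dot _ _ (by simpa using he)]
  simp

theorem pv_isIn_dot (l : List Char) : PySem.Chars.isIn ['.'] l = true ↔ '.' ∈ l := by
  rw [PySem.Chars.isIn_iff_infix, List.singleton_infix_iff]

set_option maxHeartbeats 1000000 in
theorem pv_lookup (x : List Char) : pvMediaTypes.getD x "document" =
    if ['j','p','g'] == x then "image" else if ['j','p','e','g'] == x then "image"
    else if ['p','n','g'] == x then "image" else if ['g','i','f'] == x then "image"
    else if ['w','e','b','p'] == x then "image"
    else if ['m','p','4'] == x then "video" else if ['a','v','i'] == x then "video"
    else if ['m','o','v'] == x then "video"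
    else if ['m','p','3'] == x then "audio" else if ['o','g','g'] == x then "audio"
    else if ['w','a','v'] == x then "audio" else if ['o','p','u','s'] == x then "audio"
    else "document" := by
  have h : pvMediaTypes = PySem.Dict.mk
    [(['j','p','g'], "image"), (['j','p','e','g'], "image"), (['p','n','g'], "image"),
     (['g','i','f'], "image"), (['w','e','b','p'], "image"),
     (['m','p','4'], "video"), (['a','v','i'], "video"), (['m','o','v'], "video"),
     (['m','p','3'], "audio"), (['o','g','g'], "audio"), (['w','a','v'], "audio"),
     (['o','p','u','s'], "audio")] := by decide
  rw [h]
  show ((PySem.Dict.mk _).get? x).getD "document" = _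
  rw [PySem.Dict.get?_mk_cons, PySem.Dict.get?_mk_cons, PySem.Dict.get?_mk_cons,
      PySem.Dict.get?_mk_cons, PySem.Dict.get?_mk_cons, PySem.Dict.get?_mk_cons,
      PySem.Dict.get?_mk_cons, PySem.Dict.get?_mk_cons, PySem.Dict.get?_mk_cons,
      PySem.Dict.get?_mk_cons, PySem.Dict.get?_mk_cons, PySem.Dict.get?_mk_cons,
      show (PySem.Dict.mk ([] : List (List Char × String))).get? x = none from rfl]
  rw [apply_ite (fun o : Option String => o.getD "document"),
      apply_ite (fun o : Option String => o.getD "document"),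
      apply_ite (fun o : Option String => o.getD "document"),
      apply_ite (fun o : Option String => o.getD "document"),
      apply_ite (fun o : Option String => o.getD "document"),
      apply_ite (fun o : Option String => o.getD "document"),
      apply_ite (fun o : Option String => o.getD "document"),
      apply_ite (fun o : Option String => o.getD "document"),
      apply_ite (fun o : Option String => o.getD "document"),
      apply_ite (fun o : Option String => o.getD "document"),
      apply_ite (fun o : Option String => o.getD "document"),
      apply_ite (fun o : Option String => o.getD "document")]
  rfl

-- ===== VERDICT (by name: the statement is the Claim_ definition above) =====
set_option maxHeartbeats 1000000 in
theorem detect_media_type_py_spec : Claim_equal_detect_media_type_py := by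
  intro url _
  show detect_media_type_py url = detect_media_type_py_alt url
  simp only [detect_media_type_py, detect_media_type_py_alt, List.any_cons, List.any_nil,
    Bool.or_false, Bool.or_eq_true, PySem.Str.endswith_eq, PySem.Str.toList_lower]
  rw [(show (".jpg" : String).toList = '.' :: ['j','p','g'] by decide),
      (show (".jpeg" : String).toList = '.' :: ['j','p','e','g'] by decide),
      (show (".png" : String).toList = '.' :: ['p','n','g'] by decide),
      (show (".gif" : String).toList = '.' :: ['g','i','f'] by decide),
      (show (".webp" : String).toList = '.' :: ['w','e','b','p'] by decide),
      (show (".mp4" : String).toList = '.' :: ['m','p','4'] by decide),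
      (show (".avi" : String).toList = '.' :: ['a','v','i'] by decide),
      (show (".mov" : String).toList = '.' :: ['m','o','v'] by decide),
      (show (".mp3" : String).toList = '.' :: ['m','p','3'] by decide),
      (show (".ogg" : String).toList = '.' :: ['o','g','g'] by decide),
      (show (".wav" : String).toList = '.' :: ['w','a','v'] by decide),
      (show (".opus" : String).toList = '.' :: ['o','p','u','s'] by decide)]
  generalize PySem.Chars.lower url.toList = lw
  simp only [pv_endswith_dot lw ['j','p','g'] (by decide)]
  simp only [pv_endswith_dot lw ['j','p','e','g'] (by decide)]
  simp only [pv_endswith_dot lw ['p','n','g'] (by decide)]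
  simp only [pv_endswith_dot lw ['g','i','f'] (by decide)]
  simp only [pv_endswith_dot lw ['w','e','b','p'] (by decide)]
  simp only [pv_endswith_dot lw ['m','p','4'] (by decide)]
  simp only [pv_endswith_dot lw ['a','v','i'] (by decide)]
  simp only [pv_endswith_dot lw ['m','o','v'] (by decide)]
  simp only [pv_endswith_dot lw ['m','p','3'] (by decide)]
  simp only [pv_endswith_dot lw ['o','g','g'] (by decide)]
  simp only [pv_endswith_dot lw ['w','a','v'] (by decide)]
  simp only [pv_endswith_dot lw ['o','p','u','s'] (by decide)]
  simp only [pv_isIn_dot]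
  simp only [List.reverse_cons, List.reverse_nil, List.nil_append, List.cons_append]
  by_cases hd : '.' ∈ lw
  · simp only [hd, true_and, if_true]
    generalize lw.reverse.takeWhile (fun c => c != '.') = t
    rw [pv_lookup]
    by_cases h1 : t = ['g','p','j']
    · rw [h1]; decide
    by_cases h2 : t = ['g','e','p','j']
    · rw [h2]; decide
    by_cases h3 : t = ['g','n','p']
    · rw [h3]; decide
    by_cases h4 : t = ['f','i','g']
    · rw [h4]; decide
    by_cases h5 : t = ['p','b','e','w']
    · rw [h5]; decide
    by_cases h6 : t = ['4','p','m']
    · rw [h6]; decide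
    by_cases h7 : t = ['i','v','a']
    · rw [h7]; decide
    by_cases h8 : t = ['v','o','m']
    · rw [h8]; decide
    by_cases h9 : t = ['3','p','m']
    · rw [h9]; decide
    by_cases h10 : t = ['g','g','o']
    · rw [h10]; decide
    by_cases h11 : t = ['v','a','w']
    · rw [h11]; decide
    by_cases h12 : t = ['s','u','p','o']
    · rw [h12]; decide
    have n1 : ¬((['j','p','g'] == t.reverse) = true) := fun hh => h1 (List.reverse_eq_iff.mp (beq_iff_eq.mp hh).symm)
    have n2 : ¬((['j','p','e','g'] == t.reverse) = true) := fun hh => h2 (List.reverse_eq_iff.mp (beq_iff_eq.mp hh).symm)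
    have n3 : ¬((['p','n','g'] == t.reverse) = true) := fun hh => h3 (List.reverse_eq_iff.mp (beq_iff_eq.mp hh).symm)
    have n4 : ¬((['g','i','f'] == t.reverse) = true) := fun hh => h4 (List.reverse_eq_iff.mp (beq_iff_eq.mp hh).symm)
    have n5 : ¬((['w','e','b','p'] == t.reverse) = true) := fun hh => h5 (List.reverse_eq_iff.mp (beq_iff_eq.mp hh).symm)
    have n6 : ¬((['m','p','4'] == t.reverse) = true) := fun hh => h6 (List.reverse_eq_iff.mp (beq_iff_eq.mp hh).symm)
    have n7 : ¬((['a','v','i'] == t.reverse) = true) := fun hh => h7 (List.reverse_eq_iff.mp (beq_iff_eq.mp hh).symm)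
    have n8 : ¬((['m','o','v'] == t.reverse) = true) := fun hh => h8 (List.reverse_eq_iff.mp (beq_iff_eq.mp hh).symm)
    have n9 : ¬((['m','p','3'] == t.reverse) = true) := fun hh => h9 (List.reverse_eq_iff.mp (beq_iff_eq.mp hh).symm)
    have n10 : ¬((['o','g','g'] == t.reverse) = true) := fun hh => h10 (List.reverse_eq_iff.mp (beq_iff_eq.mp hh).symm)
    have n11 : ¬((['w','a','v'] == t.reverse) = true) := fun hh => h11 (List.reverse_eq_iff.mp (beq_iff_eq.mp hh).symm)
    have n12 : ¬((['o','p','u','s'] == t.reverse) = true) := fun hh => h12 (List.reverse_eq_iff.mp (beq_iff_eq.mp hh).symm)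
    simp [h1, h2, h3, h4, h5, h6, h7, h8, h9, h10, h11, h12,
          n1, n2, n3, n4, n5, n6, n7, n8, n9, n10, n11, n12]
  · simp [hd]
    decide
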